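-- pv_equiv track=rewrite | github.com/OlgaAlekhina/algorithms | numTeams2.py | num_teams
-- ===== SOURCE A (Python) =====
-- from typing import List
--
-- def num_teams(rating: List[int]) -> int:
--     team_count = 0
--     for i in range(1, len(rating) - 1):
--         count_s, count_l = 0, 0
--         for j in range(i):
--             if rating[j] < rating[i]:
--                 count_s += 1
--             elif rating[j] > rating[i]:
--                 count_l += 1
--         for k in range(i + 1, len(rating)):
--             if rating[k] > rating[i]:
--                 team_count += count_s
--             elif rating[k] < rating[i]:
--                 team_count += count_l
--
--     return team_count
-- ===== SOURCE B (Python) =====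
-- from typing import List
--
-- def num_teams(rating: List[int]) -> int:
--     n = len(rating)
--     total = 0
--     for i in range(n):
--         for j in range(i + 1, n):
--             for k in range(j + 1, n):
--                 a, b, c = rating[i], rating[j], rating[k]
--                 if a < b < c or a > b > c:
--                     total += 1
--     return total
-- ===== Notes on version B (the rewrite author's own statement) =====
-- stated objective: simpler
-- what changed: A keeps smaller/larger prefix counters per middle element and accumulates them over the suffix; B drops the counting scheme entirely and enumerates every index triple i<j<k, testing the monotone condition directly (the problem's definition itself).
import Mathlib
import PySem

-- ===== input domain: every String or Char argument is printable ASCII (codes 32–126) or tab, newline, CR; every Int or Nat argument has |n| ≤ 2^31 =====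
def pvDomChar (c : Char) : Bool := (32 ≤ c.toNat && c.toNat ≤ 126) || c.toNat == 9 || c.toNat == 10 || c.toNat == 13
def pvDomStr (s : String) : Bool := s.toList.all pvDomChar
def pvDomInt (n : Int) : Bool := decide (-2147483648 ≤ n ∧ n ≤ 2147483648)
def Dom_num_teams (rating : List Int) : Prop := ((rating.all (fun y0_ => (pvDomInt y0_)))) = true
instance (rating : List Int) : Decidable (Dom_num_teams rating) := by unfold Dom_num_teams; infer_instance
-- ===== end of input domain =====

-- B drops A's prefix-counter scheme and simply enumerates every index triple i<j<k,
-- testing the monotone condition directly: simpler (the definition itself), at O(n^3) vs A's O(n^2).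

-- ===== PORT A =====
def num_teams (rating : List Int) : Int :=
  (PySem.List.pyRange 1 ((rating.length : Int) - 1) 1).foldl (fun team_count i =>
    let ri := PySem.List.pyGetD rating i 0
    let cs := (PySem.List.pyRange 0 i 1).foldl (fun (p : Int × Int) j =>
        let rj := PySem.List.pyGetD rating j 0
        if rj < ri then (p.1 + 1, p.2) else if rj > ri then (p.1, p.2 + 1) else p) (0, 0)
    (PySem.List.pyRange (i + 1) ((rating.length : Int)) 1).foldl (fun tc k =>
        let rk := PySem.List.pyGetD rating k 0
        if rk > ri then tc + cs.1 else if rk < ri then tc + cs.2 else tc) team_count) 0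

-- ===== PORT B =====
def num_teams_alt (rating : List Int) : Int :=
  let n : Int := (rating.length : Int)
  (PySem.List.pyRange 0 n 1).foldl (fun total i =>
    (PySem.List.pyRange (i + 1) n 1).foldl (fun total j =>
      (PySem.List.pyRange (j + 1) n 1).foldl (fun total k =>
        let a := PySem.List.pyGetD rating i 0
        let b := PySem.List.pyGetD rating j 0
        let c := PySem.List.pyGetD rating k 0
        if (a < b ∧ b < c) ∨ (b < a ∧ c < b) then total + 1 else total) total) total) 0

-- ===== PRECONDITION & SPEC =====
def Spec_num_teams (rating : List Int) (out : Int) : Prop := out = num_teams_alt rating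
instance (rating : List Int) (out : Int) : Decidable (Spec_num_teams rating out) := by unfold Spec_num_teams; infer_instance

-- ===== CLAIM (what is proved, stated in full; the proofs are below) =====
def Claim_equal_num_teams : Prop := ∀ (rating : List Int), Dom_num_teams rating → Spec_num_teams rating (num_teams rating)

-- ===== LEMMAS AND PROOFS =====

-- the per-middle-index contribution: (#smaller before)·(#larger after) + (#larger before)·(#smaller after)
def pvT (xs : List Int) (j : Int) : Int :=
  let x := PySem.List.pyGetD xs j 0
  ((xs.take j.toNat).countP (fun v => decide (v < x)) : Int) * ((xs.drop (j + 1).toNat).countP (fun v => decide (x < v)) : Int)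
  + ((xs.take j.toNat).countP (fun v => decide (x < v)) : Int) * ((xs.drop (j + 1).toNat).countP (fun v => decide (v < x)) : Int)

-- the per-(first,second) contribution: number of valid third elements after j
def pvH (xs : List Int) (i j : Int) : Int :=
  if PySem.List.pyGetD xs i 0 < PySem.List.pyGetD xs j 0 then
    ((xs.drop (j + 1).toNat).countP (fun c => decide (PySem.List.pyGetD xs j 0 < c)) : Int)
  else if PySem.List.pyGetD xs j 0 < PySem.List.pyGetD xs i 0 then
    ((xs.drop (j + 1).toNat).countP (fun c => decide (c < PySem.List.pyGetD xs j 0)) : Int)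
  else 0

-- A's first inner loop computes the two prefix counters.
theorem pv_pairfold (x : Int) (xs : List Int) (a b : Int) :
    xs.foldl (fun (p : Int × Int) v =>
        if v < x then (p.1 + 1, p.2) else if v > x then (p.1, p.2 + 1) else p) (a, b)
      = (a + xs.countP (fun v => decide (v < x)), b + xs.countP (fun v => decide (v > x))) := by
  induction xs generalizing a b with
  | nil => simp
  | cons v t ih =>
    simp only [List.foldl_cons, List.countP_cons]
    by_cases h1 : v < x
    · have h2 : ¬ v > x := by omega
      simp [h1, h2, ih, Prod.ext_iff]
      omega
    · by_cases h2 : v > x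
      · simp [h1, h2, ih, Prod.ext_iff]
        omega
      · simp [h1, h2, ih]

-- A's second inner loop adds s per larger and l per smaller element: a closed product form.
theorem pv_sumfold (x s l : Int) (xs : List Int) (acc : Int) :
    xs.foldl (fun tc v => if v > x then tc + s else if v < x then tc + l else tc) acc
      = acc + s * xs.countP (fun v => decide (v > x)) + l * xs.countP (fun v => decide (v < x)) := by
  induction xs generalizing acc with
  | nil => simp
  | cons v t ih =>
    simp only [List.foldl_cons, List.countP_cons]
    by_cases h2 : v > x
    · have h1 : ¬ v < x := by omega
      simp [h1, h2, ih]
      ring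
    · by_cases h1 : v < x
      · simp [h1, h2, ih]
        ring
      · simp [h1, h2, ih]

-- fold over range(0, i) indexing rating = fold over the prefix rating[:i]
theorem pv_fold_prefix {α : Type} (xs : List Int) (i : Int) (h0 : 0 ≤ i)
    (hle : i ≤ (xs.length : Int)) (f : α → Int → α) (init : α) :
    (PySem.List.pyRange 0 i 1).foldl (fun acc j => f acc (PySem.List.pyGetD xs j 0)) init
      = (xs.take i.toNat).foldl f init := by
  have hc : (PySem.List.pyRange 0 i 1).foldl
      (fun acc j => f acc (PySem.List.pyGetD xs j 0)) init
      = (PySem.List.pyRange 0 i 1).foldl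
      (fun acc j => f acc (PySem.List.pyGetD (xs.take i.toNat) j 0)) init := by
    apply PySem.List.foldl_congr_mem
    intro acc j hj
    rw [PySem.List.mem_pyRange_one] at hj
    rw [PySem.List.pyGetD_eq_getElem xs (i := j) 0 hj.1 (by omega),
        PySem.List.pyGetD_eq_getElem (xs.take i.toNat) (i := j) 0 hj.1 (by simp [List.length_take]; omega)]
    rw [List.getElem_take]
  have key : ∀ (ys : List Int), (ys.length : Int) = i →
      (PySem.List.pyRange 0 i 1).foldl (fun acc j => f acc (PySem.List.pyGetD ys j 0)) init
        = ys.foldl f init := by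
    intro ys hy
    rw [← hy]
    exact PySem.List.foldl_pyRange_zero_pyGetD' ys 0 f init
  rw [hc]
  exact key _ (by simp [List.length_take]; omega)

-- a list sum over pyRange ↑a ↑b is the Finset sum over Ico a b
theorem pv_sum_pyRange (a b : Nat) (f : Int → Int) :
    ((PySem.List.pyRange (a : Int) (b : Int) 1).map f).sum = ∑ j ∈ Finset.Ico a b, f (j : Int) := by
  rw [PySem.List.pyRange_one, Finset.sum_Ico_eq_sum_range, List.map_map]
  have hba : ((b : Int) - (a : Int)).toNat = b - a := by omega
  rw [hba]
  rw [show (f ∘ fun k : Nat => (a : Int) + (k : Int)) = (fun k : Nat => f ((a + k : Nat) : Int)) from by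
    funext k; simp]
  rfl

-- triangular Fubini: sum over i<j by first index = by second index
theorem pv_tri (n : Nat) (g : Nat → Nat → Int) :
    ∑ i ∈ Finset.range n, ∑ j ∈ Finset.Ico (i + 1) n, g i j
      = ∑ j ∈ Finset.range n, ∑ i ∈ Finset.range j, g i j := by
  induction n with
  | zero => simp
  | succ n ih =>
    rw [Finset.sum_range_succ, Finset.sum_range_succ]
    have h1 : ∀ i ∈ Finset.range n, ∑ j ∈ Finset.Ico (i + 1) (n + 1), g i j
        = (∑ j ∈ Finset.Ico (i + 1) n, g i j) + g i n := by
      intro i hi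
      simp only [Finset.mem_range] at hi
      rw [Finset.sum_Ico_succ_top (by omega)]
    rw [Finset.sum_congr rfl h1, Finset.sum_add_distrib, ih]
    have h2 : ∑ j ∈ Finset.Ico (n + 1) (n + 1), g n j = 0 := by simp
    rw [h2, add_zero]

-- A computes the sum of the per-middle contributions
theorem pv_A_sum (xs : List Int) :
    num_teams xs = ∑ j ∈ Finset.range xs.length, pvT xs (j : Int) := by
  have hmain : ∀ (acc : Int), ∀ i ∈ PySem.List.pyRange 1 ((xs.length : Int) - 1) 1,
      (PySem.List.pyRange (i + 1) ((xs.length : Int)) 1).foldl (fun tc k =>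
        let rk := PySem.List.pyGetD xs k 0
        if rk > PySem.List.pyGetD xs i 0 then
          tc + ((PySem.List.pyRange 0 i 1).foldl (fun (p : Int × Int) j =>
            let rj := PySem.List.pyGetD xs j 0
            if rj < PySem.List.pyGetD xs i 0 then (p.1 + 1, p.2)
            else if rj > PySem.List.pyGetD xs i 0 then (p.1, p.2 + 1) else p) (0, 0)).1
        else if rk < PySem.List.pyGetD xs i 0 then
          tc + ((PySem.List.pyRange 0 i 1).foldl (fun (p : Int × Int) j =>
            let rj := PySem.List.pyGetD xs j 0
            if rj < PySem.List.pyGetD xs i 0 then (p.1 + 1, p.2)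
            else if rj > PySem.List.pyGetD xs i 0 then (p.1, p.2 + 1) else p) (0, 0)).2
        else tc) acc = acc + pvT xs i := by
    intro acc i hi
    rw [PySem.List.mem_pyRange_one] at hi
    obtain ⟨h1, h2⟩ := hi
    have hpair := pv_fold_prefix xs i (by omega) (by omega)
        (fun (p : Int × Int) rj =>
          if rj < PySem.List.pyGetD xs i 0 then (p.1 + 1, p.2)
          else if rj > PySem.List.pyGetD xs i 0 then (p.1, p.2 + 1) else p) ((0 : Int), (0 : Int))
    simp only [hpair, pv_pairfold]
    have hdrop := PySem.List.foldl_pyRange_pyGetD' xs (0 : Int)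
        (fun tc rk =>
          if rk > PySem.List.pyGetD xs i 0 then
            tc + ((0 : Int) + ((xs.take i.toNat).countP (fun v => decide (v < PySem.List.pyGetD xs i 0)) : Int))
          else if rk < PySem.List.pyGetD xs i 0 then
            tc + ((0 : Int) + ((xs.take i.toNat).countP (fun v => decide (v > PySem.List.pyGetD xs i 0)) : Int))
          else tc) acc (a := i + 1) (by omega)
    simp only [hdrop, pv_sumfold]
    have ht : (i + 1).toNat = i.toNat + 1 := by omega
    rw [ht]
    unfold pvT
    simp only [gt_iff_lt]
    simp only [ht]
    ring
  have hA : num_teams xs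
      = (PySem.List.pyRange 1 ((xs.length : Int) - 1) 1).foldl (fun acc i => acc + pvT xs i) 0 := by
    unfold num_teams
    apply PySem.List.foldl_congr_mem
    exact hmain
  rw [hA, PySem.List.foldl_add, zero_add]
  cases hn : xs.length with
  | zero => simp [PySem.List.pyRange_one_eq_nil]
  | succ m =>
    cases m with
    | zero =>
      have h0 : pvT xs 0 = 0 := by simp [pvT]
      simp [PySem.List.pyRange_one_eq_nil, h0]
    | succ m' =>
      have hb : ((m' + 1 + 1 : Nat) : Int) - 1 = (((m' + 1 : Nat)) : Int) := by push_cast; ring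
      rw [hb]
      refine (pv_sum_pyRange 1 (m' + 1) (pvT xs)).trans ?_
      have h0 : pvT xs 0 = 0 := by simp [pvT]
      have hlast : pvT xs ((m' : Int) + 1) = 0 := by
        unfold pvT
        have hd : ((m' : Int) + 1 + 1).toNat = xs.length := by omega
        rw [hd]
        simp
      rw [Finset.range_eq_Ico, ← Finset.sum_Ico_consecutive (fun j : Nat => pvT xs (j : Int))
          (show (0 : Nat) ≤ 1 by omega) (show 1 ≤ m' + 1 + 1 by omega)]
      rw [Finset.sum_Ico_succ_top (show 1 ≤ m' + 1 by omega) (fun j : Nat => pvT xs (j : Int))]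
      simp [h0, hlast]

-- B computes the sum of the per-(first,second) contributions
theorem pv_B_sum (xs : List Int) :
    num_teams_alt xs = ∑ i ∈ Finset.range xs.length, ∑ j ∈ Finset.Ico (i + 1) xs.length, pvH xs (i : Int) (j : Int) := by
  have hinner : ∀ (i : Int), 0 ≤ i → ∀ (acc : Int), ∀ j ∈ PySem.List.pyRange (i + 1) (xs.length : Int) 1,
      (PySem.List.pyRange (j + 1) (xs.length : Int) 1).foldl (fun total c =>
        if (PySem.List.pyGetD xs i 0 < PySem.List.pyGetD xs j 0 ∧
              PySem.List.pyGetD xs j 0 < PySem.List.pyGetD xs c 0)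
          ∨ (PySem.List.pyGetD xs j 0 < PySem.List.pyGetD xs i 0 ∧
              PySem.List.pyGetD xs c 0 < PySem.List.pyGetD xs j 0)
        then total + 1 else total) acc = acc + pvH xs i j := by
    intro i hi0 acc j hj
    rw [PySem.List.mem_pyRange_one] at hj
    have hd := PySem.List.foldl_pyRange_pyGetD' xs (0 : Int)
      (fun total c =>
        if (PySem.List.pyGetD xs i 0 < PySem.List.pyGetD xs j 0 ∧ PySem.List.pyGetD xs j 0 < c)
          ∨ (PySem.List.pyGetD xs j 0 < PySem.List.pyGetD xs i 0 ∧ c < PySem.List.pyGetD xs j 0)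
        then total + 1 else total) acc (a := j + 1) (by omega)
    rw [hd]
    have hb2 : (fun (total : Int) (c : Int) =>
        if (PySem.List.pyGetD xs i 0 < PySem.List.pyGetD xs j 0 ∧ PySem.List.pyGetD xs j 0 < c)
          ∨ (PySem.List.pyGetD xs j 0 < PySem.List.pyGetD xs i 0 ∧ c < PySem.List.pyGetD xs j 0)
        then total + 1 else total)
        = (fun (total : Int) (c : Int) =>
        if (fun c => decide ((PySem.List.pyGetD xs i 0 < PySem.List.pyGetD xs j 0 ∧ PySem.List.pyGetD xs j 0 < c)
          ∨ (PySem.List.pyGetD xs j 0 < PySem.List.pyGetD xs i 0 ∧ c < PySem.List.pyGetD xs j 0))) c = true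
        then total + 1 else total) := by
      funext t c
      simp
    rw [hb2, PySem.List.foldl_count_if]
    unfold pvH
    by_cases hab : PySem.List.pyGetD xs i 0 < PySem.List.pyGetD xs j 0
    · rw [if_pos hab]
      congr 2
      apply List.countP_congr
      intro c _
      simp only [decide_eq_true_eq]
      omega
    · rw [if_neg hab]
      by_cases hba : PySem.List.pyGetD xs j 0 < PySem.List.pyGetD xs i 0
      · rw [if_pos hba]
        congr 2
        apply List.countP_congr
        intro c _
        simp only [decide_eq_true_eq]
        omega
      · rw [if_neg hba]
        have hz : (List.countP (fun c => decide ((PySem.List.pyGetD xs i 0 < PySem.List.pyGetD xs j 0 ∧ PySem.List.pyGetD xs j 0 < c)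
            ∨ (PySem.List.pyGetD xs j 0 < PySem.List.pyGetD xs i 0 ∧ c < PySem.List.pyGetD xs j 0)))
            (xs.drop (j + 1).toNat)) = 0 := by
          rw [List.countP_eq_zero]
          intro c _
          simp only [decide_eq_true_eq]
          omega
        rw [hz]
        simp
  have hmid : ∀ (acc : Int), ∀ i ∈ PySem.List.pyRange 0 (xs.length : Int) 1,
      (PySem.List.pyRange (i + 1) (xs.length : Int) 1).foldl (fun total j =>
        (PySem.List.pyRange (j + 1) (xs.length : Int) 1).foldl (fun total c =>
          if (PySem.List.pyGetD xs i 0 < PySem.List.pyGetD xs j 0 ∧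
                PySem.List.pyGetD xs j 0 < PySem.List.pyGetD xs c 0)
            ∨ (PySem.List.pyGetD xs j 0 < PySem.List.pyGetD xs i 0 ∧
                PySem.List.pyGetD xs c 0 < PySem.List.pyGetD xs j 0)
          then total + 1 else total) total) acc
      = acc + ((PySem.List.pyRange (i + 1) (xs.length : Int) 1).map (pvH xs i)).sum := by
    intro acc i hi
    rw [PySem.List.mem_pyRange_one] at hi
    rw [PySem.List.foldl_congr_mem _ _ (fun total j => total + pvH xs i j) acc (hinner i hi.1)]
    exact PySem.List.foldl_add _ _ _
  have hB : num_teams_alt xs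
      = (PySem.List.pyRange 0 (xs.length : Int) 1).foldl
          (fun acc i => acc + ((PySem.List.pyRange (i + 1) (xs.length : Int) 1).map (pvH xs i)).sum) 0 := by
    unfold num_teams_alt
    apply PySem.List.foldl_congr_mem
    exact hmid
  rw [hB, PySem.List.foldl_add, zero_add]
  rw [show (0 : Int) = ((0 : Nat) : Int) from rfl]
  rw [pv_sum_pyRange 0 xs.length
      (fun i => ((PySem.List.pyRange (i + 1) (xs.length : Int) 1).map (pvH xs i)).sum)]
  rw [Finset.range_eq_Ico]
  apply Finset.sum_congr rfl
  intro i _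
  have hc : ((i : Int) + 1) = (((i + 1 : Nat)) : Int) := by push_cast; ring
  rw [hc, pv_sum_pyRange (i + 1) xs.length (pvH xs (i : Int))]

-- summing pvH over the first index recovers the per-middle product form
theorem pv_rowT (xs : List Int) (j : Nat) (hj : j < xs.length) :
    ∑ i ∈ Finset.range j, pvH xs (i : Int) (j : Int) = pvT xs (j : Int) := by
  have h1 : ∑ i ∈ Finset.range j, pvH xs (i : Int) (j : Int)
      = ((PySem.List.pyRange 0 (j : Int) 1).map (fun i => pvH xs i (j : Int))).sum := by
    rw [show (0 : Int) = ((0 : Nat) : Int) from rfl,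
        pv_sum_pyRange 0 j (fun i => pvH xs i (j : Int)), Finset.range_eq_Ico]
  have h2 : ((PySem.List.pyRange 0 (j : Int) 1).map (fun i => pvH xs i (j : Int))).sum
      = (PySem.List.pyRange 0 (j : Int) 1).foldl (fun acc i => acc + pvH xs i (j : Int)) 0 := by
    rw [PySem.List.foldl_add]
    simp
  have h3 : (PySem.List.pyRange 0 (j : Int) 1).foldl (fun acc i => acc + pvH xs i (j : Int)) 0
      = (PySem.List.pyRange 0 (j : Int) 1).foldl (fun acc i =>
          (fun (acc : Int) (v : Int) => acc +
            (if v < PySem.List.pyGetD xs (j : Int) 0 then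
              ((xs.drop ((j : Int) + 1).toNat).countP (fun c => decide (PySem.List.pyGetD xs (j : Int) 0 < c)) : Int)
            else if PySem.List.pyGetD xs (j : Int) 0 < v then
              ((xs.drop ((j : Int) + 1).toNat).countP (fun c => decide (c < PySem.List.pyGetD xs (j : Int) 0)) : Int)
            else 0)) acc (PySem.List.pyGetD xs i 0)) 0 := rfl
  rw [h1, h2, h3, pv_fold_prefix xs (j : Int) (by omega) (by omega)
      (fun (acc : Int) (v : Int) => acc +
        (if v < PySem.List.pyGetD xs (j : Int) 0 then
          ((xs.drop ((j : Int) + 1).toNat).countP (fun c => decide (PySem.List.pyGetD xs (j : Int) 0 < c)) : Int)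
        else if PySem.List.pyGetD xs (j : Int) 0 < v then
          ((xs.drop ((j : Int) + 1).toNat).countP (fun c => decide (c < PySem.List.pyGetD xs (j : Int) 0)) : Int)
        else 0)) 0]
  have h4 : (xs.take ((j : Int)).toNat).foldl (fun (acc : Int) (v : Int) => acc +
            (if v < PySem.List.pyGetD xs (j : Int) 0 then
              ((xs.drop ((j : Int) + 1).toNat).countP (fun c => decide (PySem.List.pyGetD xs (j : Int) 0 < c)) : Int)
            else if PySem.List.pyGetD xs (j : Int) 0 < v then
              ((xs.drop ((j : Int) + 1).toNat).countP (fun c => decide (c < PySem.List.pyGetD xs (j : Int) 0)) : Int)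
            else 0)) 0
      = (xs.take ((j : Int)).toNat).foldl (fun (acc : Int) (v : Int) =>
          if v > PySem.List.pyGetD xs (j : Int) 0 then
            acc + ((xs.drop ((j : Int) + 1).toNat).countP (fun c => decide (c < PySem.List.pyGetD xs (j : Int) 0)) : Int)
          else if v < PySem.List.pyGetD xs (j : Int) 0 then
            acc + ((xs.drop ((j : Int) + 1).toNat).countP (fun c => decide (PySem.List.pyGetD xs (j : Int) 0 < c)) : Int)
          else acc) 0 := by
    apply PySem.List.foldl_congr_mem
    intro acc v _
    split_ifs <;> omega
  rw [h4, pv_sumfold]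
  unfold pvT
  simp only [gt_iff_lt]
  ring

-- ===== VERDICT (by name: the statement is the Claim_ definition above) =====

theorem num_teams_spec : Claim_equal_num_teams := by
  intro rating _
  unfold Spec_num_teams
  rw [pv_A_sum, pv_B_sum, pv_tri]
  apply Finset.sum_congr rfl
  intro j hj
  exact (pv_rowT rating j (Finset.mem_range.mp hj)).symm
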